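-- pv_equiv track=rewrite | github.com/Weslife2002/lambda-game-recommendation-cron- | main.py | convert_purchased_record_to_set_of_game_ids
-- ===== SOURCE A (Python) =====
-- def convert_purchased_record_to_set_of_game_ids(user_purchased_game_records):
--   set_of_game_ids = []
--   currentUserId = None
--   for i in range(len(user_purchased_game_records)):
--     userId = user_purchased_game_records[i][0]
--     gameId = user_purchased_game_records[i][1]
--     if (userId != currentUserId):
--       currentUserId = userId
--       set_of_game_ids.append([gameId])
--     else:
--       set_of_game_ids[-1].append(gameId)
--
--   return set_of_game_ids
-- ===== SOURCE B (Python) =====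
-- def convert_purchased_record_to_set_of_game_ids(user_purchased_game_records):
--   n = len(user_purchased_game_records)
--   # pass 1: positions where a new consecutive run of user ids starts
--   cuts = [i for i in range(n)
--           if i == 0 or user_purchased_game_records[i][0] != user_purchased_game_records[i - 1][0]]
--   cuts.append(n)
--   # pass 2: slice the game ids out between consecutive cut positions
--   return [[user_purchased_game_records[k][1] for k in range(a, b)]
--           for a, b in zip(cuts, cuts[1:])]
-- ===== Notes on version B (the rewrite author's own statement) =====
-- stated objective: alternative
-- what changed: Replaced the single stateful pass (currentUserId sentinel, mutating set_of_game_ids[-1]) by two staged passes over indices: first compute the list of cut positions where a new consecutive run starts, then slice the game ids out between consecutive cut positions via zip(cuts, cuts[1:]).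
import Mathlib
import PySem

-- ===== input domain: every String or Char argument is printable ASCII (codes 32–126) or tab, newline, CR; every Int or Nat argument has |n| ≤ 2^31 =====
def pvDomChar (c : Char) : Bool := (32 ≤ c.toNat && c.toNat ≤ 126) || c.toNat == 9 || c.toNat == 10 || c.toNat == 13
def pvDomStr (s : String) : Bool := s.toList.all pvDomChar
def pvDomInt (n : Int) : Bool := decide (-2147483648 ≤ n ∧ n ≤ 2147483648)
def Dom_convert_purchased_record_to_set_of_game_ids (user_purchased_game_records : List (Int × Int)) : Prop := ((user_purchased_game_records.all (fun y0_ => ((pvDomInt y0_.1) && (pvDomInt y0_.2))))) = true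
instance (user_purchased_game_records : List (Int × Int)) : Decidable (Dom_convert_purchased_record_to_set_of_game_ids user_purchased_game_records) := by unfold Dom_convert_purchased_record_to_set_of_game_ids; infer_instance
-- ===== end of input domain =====

-- B replaces A's stateful single pass (currentUserId sentinel, mutation of set_of_game_ids[-1])
-- by two staged index passes: compute the cut positions where a run starts, then slice between
-- consecutive cuts; objective: alternative (same cost, different algorithmic decomposition).

-- ===== PORT A =====
-- Port of A: one pass with an Option Int "currentUserId" (None initially) and an
-- append-to-last-list helper mirroring set_of_game_ids[-1].append(gameId).
def pvAppendLast : List (List Int) → Int → List (List Int)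
  | [], _ => []
  | [x], g => [x ++ [g]]
  | x :: y :: xs, g => x :: pvAppendLast (y :: xs) g

def pvStepA (st : List (List Int) × Option Int) (rec : Int × Int) : List (List Int) × Option Int :=
  if (some rec.1 ≠ st.2) then (st.1 ++ [[rec.2]], some rec.1)
  else (pvAppendLast st.1 rec.2, st.2)

def convert_purchased_record_to_set_of_game_ids (user_purchased_game_records : List (Int × Int)) : List (List Int) :=
  (user_purchased_game_records.foldl pvStepA ([], none)).1

-- ===== PORT B =====
-- Port of B: pass 1 computes the cut positions i with i == 0 or records[i][0] != records[i-1][0]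
-- (Python indexing is always in range here, so List.getD is exact), appends n; pass 2 builds
-- [records[k][1] for k in range(a, b)] for each (a, b) in zip(cuts, cuts[1:]).
def pvChg (l : List (Int × Int)) (i : Nat) : Bool :=
  i == 0 || !((l.getD i (0, 0)).1 == (l.getD (i - 1) (0, 0)).1)

def pvGroup (l : List (Int × Int)) (ab : Nat × Nat) : List Int :=
  (List.range' ab.1 (ab.2 - ab.1)).map (fun k => (l.getD k (0, 0)).2)

def convert_purchased_record_to_set_of_game_ids_alt (user_purchased_game_records : List (Int × Int)) : List (List Int) :=
  let n := user_purchased_game_records.length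
  let cuts := ((List.range n).filter (pvChg user_purchased_game_records)) ++ [n]
  (cuts.zip (cuts.drop 1)).map (pvGroup user_purchased_game_records)

-- ===== PRECONDITION & SPEC =====
def Spec_convert_purchased_record_to_set_of_game_ids (user_purchased_game_records : List (Int × Int)) (out : List (List Int)) : Prop := out = convert_purchased_record_to_set_of_game_ids_alt user_purchased_game_records
instance (user_purchased_game_records : List (Int × Int)) (out : List (List Int)) : Decidable (Spec_convert_purchased_record_to_set_of_game_ids user_purchased_game_records out) := by unfold Spec_convert_purchased_record_to_set_of_game_ids; infer_instance

-- ===== CLAIM (what is proved, stated in full; the proofs are below) =====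
def Claim_equal_convert_purchased_record_to_set_of_game_ids : Prop := ∀ (user_purchased_game_records : List (Int × Int)), Dom_convert_purchased_record_to_set_of_game_ids user_purchased_game_records → Spec_convert_purchased_record_to_set_of_game_ids user_purchased_game_records (convert_purchased_record_to_set_of_game_ids user_purchased_game_records)

-- ===== LEMMAS AND PROOFS =====

-- Proof-side intermediate: the per-run recursion both ports are shown equal to.
def pvRuns : List (Int × Int) → List (List Int)
  | [] => []
  | (u, g) :: rest =>
    (g :: (rest.takeWhile (fun p => p.1 == u)).map Prod.snd)
      :: pvRuns (rest.dropWhile (fun p => p.1 == u))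
termination_by l => l.length
decreasing_by
  simp only [List.length_cons]
  exact Nat.lt_succ_of_le (List.length_dropWhile_le _ _)

@[simp] lemma pvRuns_nil : pvRuns [] = [] := by unfold pvRuns; rfl

lemma pvRuns_cons (u g : Int) (rest : List (Int × Int)) :
    pvRuns ((u, g) :: rest) =
      (g :: (rest.takeWhile (fun p => p.1 == u)).map Prod.snd)
        :: pvRuns (rest.dropWhile (fun p => p.1 == u)) := by
  conv_lhs => rw [pvRuns]

-- ---- A = pvRuns ----
lemma pvAppendLast_snoc (acc : List (List Int)) (p : List Int) (g : Int) :
    pvAppendLast (acc ++ [p]) g = acc ++ [p ++ [g]] := by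
  induction acc with
  | nil => simp [pvAppendLast]
  | cons x xs ih =>
    cases xs with
    | nil => simp [pvAppendLast]
    | cons y ys => simpa [pvAppendLast] using ih

lemma pvMainA (l : List (Int × Int)) : ∀ (acc : List (List Int)) (p : List Int) (u : Int),
    (l.foldl pvStepA (acc ++ [p], some u)).1 =
      acc ++ [p ++ (l.takeWhile (fun q => q.1 == u)).map Prod.snd]
        ++ pvRuns (l.dropWhile (fun q => q.1 == u)) := by
  induction l with
  | nil => intro acc p u; simp
  | cons hd tl ih =>
    intro acc p u
    obtain ⟨v, g⟩ := hd
    by_cases hv : v = u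
    · subst hv
      have h1 : pvStepA (acc ++ [p], some v) (v, g) = (acc ++ [p ++ [g]], some v) := by
        simp [pvStepA, pvAppendLast_snoc]
      simp only [List.foldl_cons, h1, ih]
      simp [List.takeWhile, List.dropWhile]
    · have h1 : pvStepA (acc ++ [p], some u) (v, g) = ((acc ++ [p]) ++ [[g]], some v) := by
        simp [pvStepA, hv]
      simp only [List.foldl_cons, h1]
      rw [ih (acc ++ [p]) [g] v]
      have hne : ((v, g).1 == u) = false := by simp [hv]
      simp [List.takeWhile, List.dropWhile, hne, pvRuns_cons]

lemma a_eq_runs (l : List (Int × Int)) :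
    convert_purchased_record_to_set_of_game_ids l = pvRuns l := by
  cases l with
  | nil => simp [convert_purchased_record_to_set_of_game_ids]
  | cons hd tl =>
    obtain ⟨u, g⟩ := hd
    show (List.foldl pvStepA (pvStepA ([], none) (u, g)) tl).1 = _
    have h1 : pvStepA ([], none) (u, g) = ([] ++ [[g]], some u) := by simp [pvStepA]
    rw [h1, pvMainA tl [] [g] u, pvRuns_cons]
    simp

-- ---- B = pvRuns ----

-- every index below the first run's length has key u
lemma pvKeyFact (u g : Int) (tw dw : List (Int × Int))
    (htw : ∀ p ∈ tw, (p.1 == u) = true) :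
    ∀ i < tw.length + 1, (((((u, g) :: tw) ++ dw).getD i (0, 0)).1 == u) = true := by
  intro i hi
  rw [List.cons_append]
  cases i with
  | zero => simp
  | succ j =>
    have hj : j < tw.length := by omega
    have : (((u, g) :: (tw ++ dw)).getD (j + 1) (0, 0)) = tw.getD j (0, 0) := by
      simp only [List.getD_eq_getElem?_getD, List.getElem?_cons_succ]
      rw [List.getElem?_append_left hj]
    rw [this]
    have hmem : tw.getD j (0, 0) ∈ tw := by
      rw [List.getD_eq_getElem _ _ hj]; exact List.getElem_mem hj
    exact htw _ hmem

lemma pvGetD_shift (front dw : List (Int × Int)) (j : Nat) :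
    ((front ++ dw).getD (front.length + j) (0, 0)) = dw.getD j (0, 0) := by
  simp only [List.getD_eq_getElem?_getD]
  rw [List.getElem?_append_right (by omega : front.length ≤ front.length + j)]
  have : front.length + j - front.length = j := by omega
  rw [this]

lemma pvGroup_prefix (xs ys : List (Int × Int)) :
    (List.range' 0 xs.length).map (fun k => ((xs ++ ys).getD k (0, 0)).2)
      = xs.map Prod.snd := by
  induction xs with
  | nil => simp
  | cons x xs' ih =>
    have h1 : List.range' 0 (xs'.length + 1) = 0 :: List.range' 1 xs'.length := by
      simp [List.range'_succ]
    have h2 : List.range' 1 xs'.length = (List.range' 0 xs'.length).map (1 + ·) := by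
      rw [List.map_add_range']
    simp only [List.length_cons, h1, List.map_cons, h2, List.map_map]
    refine List.cons_eq_cons.mpr ⟨rfl, ?_⟩
    rw [← ih]
    apply List.map_congr_left
    intro j _
    simp only [Function.comp_apply, List.getD_eq_getElem?_getD]
    rw [Nat.add_comm 1 j]
    rfl

-- the cut list of l decomposes across the first run
lemma pvCuts_decomp (u g : Int) (tw dw : List (Int × Int))
    (htw : ∀ p ∈ tw, (p.1 == u) = true)
    (hdw : ∀ q ∈ dw.head?, (q.1 == u) = false) :
    (List.range ((((u, g) :: tw) ++ dw).length)).filter (pvChg (((u, g) :: tw) ++ dw))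
      = 0 :: ((List.range dw.length).filter (pvChg dw)).map ((tw.length + 1) + ·) := by
  set l := ((u, g) :: tw) ++ dw with hl
  set t := tw.length + 1 with ht
  have hlen : l.length = t + dw.length := by simp [hl, ht]; omega
  have hkey := pvKeyFact u g tw dw htw
  rw [hlen, List.range_add, List.filter_append]
  have hfront : (List.range t).filter (pvChg l) = [0] := by
    rw [ht, List.range_succ_eq_map, List.filter_cons_of_pos (by simp [pvChg]),
        List.filter_map]
    have : ((List.range tw.length).filter (pvChg l ∘ Nat.succ)) = [] := by
      rw [List.filter_eq_nil_iff]
      intro j hj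
      have hj' : j < tw.length := List.mem_range.mp hj
      have h1 : ((l.getD (j + 1) (0, 0)).1 == u) = true := hkey (j + 1) (by omega)
      have h2 : ((l.getD j (0, 0)).1 == u) = true := hkey j (by omega)
      simp only [Function.comp, pvChg, Nat.succ_eq_add_one]
      simp only [Nat.add_sub_cancel]
      have e1 := eq_of_beq h1
      have e2 := eq_of_beq h2
      simp only [List.getD_eq_getElem?_getD] at e1 e2
      simp [e1, e2]
    rw [this]; rfl
  have hback : (List.map (t + ·) (List.range dw.length)).filter (pvChg l)
      = ((List.range dw.length).filter (pvChg dw)).map (t + ·) := by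
    rw [List.filter_map]
    congr 1
    apply List.filter_congr
    intro j hj
    have hj' : j < dw.length := List.mem_range.mp hj
    have hfrontlen : ((u, g) :: tw).length = t := by simp [ht]
    have hshift : ∀ k, l.getD (t + k) (0, 0) = dw.getD k (0, 0) := by
      intro k; rw [hl, ← hfrontlen]; exact pvGetD_shift _ _ _
    simp only [Function.comp]
    cases j with
    | zero =>
      obtain ⟨q, qs, rfl⟩ : ∃ q qs, dw = q :: qs := by
        cases dw with
        | nil => simp at hj'
        | cons q qs => exact ⟨q, qs, rfl⟩
      have hq : (q.1 == u) = false := hdw q (by simp)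
      have h1 : l.getD t (0, 0) = q := by
        have := hshift 0; simpa using this
      have h2 : ((l.getD (t - 1) (0, 0)).1 == u) = true := hkey (t - 1) (by omega)
      have e2 := eq_of_beq h2
      simp only [pvChg, Nat.add_zero, h1]
      have ht0 : (t == 0) = false := by simp [ht]
      rw [ht0]
      simp only [Bool.false_or]
      have hne : ¬ q.1 = (l.getD (t - 1) (0, 0)).1 := by
        rw [e2]; simpa using hq
      simp only [List.getD_eq_getElem?_getD] at hne
      simp [hne]
    | succ k =>
      have h1 : l.getD (t + (k + 1)) (0, 0) = dw.getD (k + 1) (0, 0) := hshift (k + 1)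
      have h2 : l.getD (t + (k + 1) - 1) (0, 0) = dw.getD k (0, 0) := by
        have : t + (k + 1) - 1 = t + k := by omega
        rw [this]; exact hshift k
      simp only [pvChg, h1, h2]
      have e1 : (t + (k + 1) == 0) = false := by simp
      have e2 : (k + 1 == 0) = false := by simp
      rw [e1, e2]
      have : k + 1 - 1 = k := by omega
      rw [this]
  rw [hfront, hback]
  rfl

lemma pvAlt_def (l : List (Int × Int)) :
    convert_purchased_record_to_set_of_game_ids_alt l =
      (((((List.range l.length).filter (pvChg l)) ++ [l.length]).zip
        ((((List.range l.length).filter (pvChg l)) ++ [l.length]).drop 1)).map (pvGroup l)) := rfl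

-- cuts always start with 0 (for nonempty l) and the zip walk recurses
lemma pvCuts_head (l : List (Int × Int)) :
    ∃ c', ((List.range l.length).filter (pvChg l)) ++ [l.length] = 0 :: c' := by
  cases l with
  | nil => exact ⟨[], rfl⟩
  | cons hd tl =>
    have : List.range (hd :: tl).length = 0 :: List.map Nat.succ (List.range tl.length) := by
      simp [List.range_succ_eq_map]
    rw [this, List.filter_cons_of_pos (by simp [pvChg])]
    exact ⟨_, rfl⟩

lemma pvDropWhile_head (p : (Int × Int) → Bool) (l : List (Int × Int)) :
    ∀ q ∈ (l.dropWhile p).head?, p q = false := by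
  induction l with
  | nil => intro q hq; simp at hq
  | cons x xs ih =>
    intro q hq
    rw [List.dropWhile_cons] at hq
    by_cases hx : p x = true
    · rw [if_pos hx] at hq; exact ih q hq
    · rw [if_neg hx] at hq
      simp at hq
      subst hq
      simpa using hx

lemma alt_eq_runs (l : List (Int × Int)) :
    convert_purchased_record_to_set_of_game_ids_alt l = pvRuns l := by
  induction l using pvRuns.induct with
  | case1 => simp [convert_purchased_record_to_set_of_game_ids_alt]
  | case2 u g rest ih =>
    set tw := rest.takeWhile (fun p => p.1 == u) with htw
    set dw := rest.dropWhile (fun p => p.1 == u) with hdw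
    have hrest : rest = tw ++ dw := (List.takeWhile_append_dropWhile).symm
    have htwp : ∀ p ∈ tw, (p.1 == u) = true := by
      intro r hr
      exact List.mem_takeWhile_imp (p := fun r : Int × Int => r.1 == u) hr
    have hdwp : ∀ q ∈ dw.head?, (q.1 == u) = false := by
      rw [hdw]; exact pvDropWhile_head _ rest
    have hl : (u, g) :: rest = ((u, g) :: tw) ++ dw := by rw [hrest]; rfl
    set t := tw.length + 1 with ht
    rw [pvRuns_cons, ← htw, ← hdw, ← ih, hl]
    rw [pvAlt_def]
    rw [pvCuts_decomp u g tw dw htwp hdwp]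
    -- now massage the zip/map
    obtain ⟨cd', hcd⟩ := pvCuts_head dw
    rw [pvAlt_def, hcd]
    have hlen : (((u, g) :: tw) ++ dw).length = t + dw.length := by simp [ht]; omega
    have hmapcuts : ((List.range dw.length).filter (pvChg dw)).map (t + ·) ++ [(((u, g) :: tw) ++ dw).length]
        = ((((List.range dw.length).filter (pvChg dw)) ++ [dw.length]).map (t + ·)) := by
      rw [List.map_append, hlen]; rfl
    have key : (0 :: ((List.range dw.length).filter (pvChg dw)).map (t + ·)) ++ [(((u, g) :: tw) ++ dw).length]
        = 0 :: ((0 :: cd').map (t + ·)) := by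
      rw [List.cons_append, hmapcuts, hcd]
    -- goal is in terms of (filter ... ++ [len]); rewrite via key
    rw [show ((0 :: ((List.range dw.length).filter (pvChg dw)).map ((tw.length + 1) + ·)) : List Nat) = (0 :: ((List.range dw.length).filter (pvChg dw)).map (t + ·)) from rfl]
    simp only [List.cons_append] at key ⊢
    rw [key]
    -- zip (0 :: t :: map) …
    simp only [List.map_cons, List.drop_succ_cons, List.drop_zero]
    rw [List.zip_cons_cons, List.map_cons]
    refine List.cons_eq_cons.mpr ⟨?_, ?_⟩
    · -- first group
      show pvGroup (((u, g) :: tw) ++ dw) (0, t + 0) = g :: tw.map Prod.snd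
      have : t + 0 - 0 = ((u, g) :: tw).length := by simp [ht]
      simp only [pvGroup, this]
      have := pvGroup_prefix ((u, g) :: tw) dw
      simpa using this
    · -- remaining groups
      have hz : ((t + 0) :: cd'.map (t + ·)) = (0 :: cd').map (t + ·) := by simp
      rw [hz, List.zip_map, List.map_map]
      apply List.map_congr_left
      intro ab _
      obtain ⟨a, b⟩ := ab
      show (List.range' (t + a) ((t + b) - (t + a))).map
            (fun k => ((((u, g) :: tw ++ dw).getD k (0, 0)).2))
          = (List.range' a (b - a)).map (fun k => ((dw.getD k (0, 0)).2))
      have hsub : (t + b) - (t + a) = b - a := by omega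
      rw [hsub, ← List.map_add_range', List.map_map]
      apply List.map_congr_left
      intro k _
      simp only [Function.comp_apply]
      have hsh := pvGetD_shift ((u, g) :: tw) dw k
      have hfl : ((u, g) :: tw).length = t := by simp [ht]
      rw [hfl] at hsh
      rw [hsh]

-- ===== VERDICT (by name: the statement is the Claim_ definition above) =====
theorem convert_purchased_record_to_set_of_game_ids_spec : Claim_equal_convert_purchased_record_to_set_of_game_ids := by
  intro l _
  unfold Spec_convert_purchased_record_to_set_of_game_ids
  rw [a_eq_runs, alt_eq_runs]
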